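-- pv_equiv track=rewrite | github.com/dtbinh/15-112 | hw9.py | findRTP
-- ===== SOURCE A (Python) =====
-- def isPrime(n, factor=2):
--     if (n < 2):
--         return False
--     if (n == 2):
--         return True
--     if (n % 2 == 0):
--         return False
--     maxFactor = round(n**0.5)
--     for factor in range(3,maxFactor+1,2):
--         if (n % factor == 0):
--             return False
--     return True
--
-- def findRTP(digits, guess = 2):
--     if isPrime(guess):
--         if len(str(guess)) == digits:       #base case: get the right number
--             return guess
--     for newNum in range(0,10):              #single number irerates from 0 to 9
--         if isPrime(guess * 10 + newNum):    #if guess is right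
--             newGuess = findRTP(digits, guess * 10 + newNum)
--             if newGuess != None:            #if next guess is right
--                 return newGuess
--     return None
-- ===== SOURCE B (Python) =====
-- def isPrime(n, factor=2):
--     if (n < 2):
--         return False
--     if (n == 2):
--         return True
--     if (n % 2 == 0):
--         return False
--     maxFactor = round(n**0.5)
--     for factor in range(3,maxFactor+1,2):
--         if (n % factor == 0):
--             return False
--     return True
--
-- def findRTP(digits, guess = 2):
--     # iterative level-order (BFS) search over prime right-extensions instead of A's recursive DFS
--     frontier = [guess]
--     while frontier:
--         if len(str(frontier[0])) == digits:
--             cands = [x for x in frontier if isPrime(x)]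
--             if cands:
--                 return min(cands)
--         frontier = [x * 10 + d for x in frontier for d in range(10) if isPrime(x * 10 + d)]
--     return None
-- ===== Notes on version B (the rewrite author's own statement) =====
-- stated objective: alternative
-- what changed: Replaces A's recursive depth-first search with early return by an iterative level-order (BFS) loop that keeps a frontier of prime right-extensions and, at the target digit length, returns the minimum prime of the level.
import Mathlib
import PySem

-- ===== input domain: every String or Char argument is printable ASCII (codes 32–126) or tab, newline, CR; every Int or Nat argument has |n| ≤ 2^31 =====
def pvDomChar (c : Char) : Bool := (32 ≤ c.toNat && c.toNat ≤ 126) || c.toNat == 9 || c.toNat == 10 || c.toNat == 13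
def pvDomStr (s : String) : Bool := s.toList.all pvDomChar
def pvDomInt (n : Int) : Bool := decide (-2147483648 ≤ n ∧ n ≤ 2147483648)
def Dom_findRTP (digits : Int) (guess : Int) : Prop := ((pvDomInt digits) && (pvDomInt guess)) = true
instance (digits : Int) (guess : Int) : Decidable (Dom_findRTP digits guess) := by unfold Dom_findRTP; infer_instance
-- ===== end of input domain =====

-- B replaces A's recursive depth-first search (with early return) by an iterative level-order
-- (BFS) loop over a frontier of prime right-extensions; objective: alternative (same cost).
-- Both loops carry the same fuel guard making the recursion total (Python terminates because
-- prime right-extension chains die out quickly; fuel = 64 far exceeds the observed depth).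

-- ===== PORT A =====
-- shared helper isPrime (Source B keeps it unchanged from A's module).
-- round(n**0.5) is ported as the nearest integer to √n, (Nat.sqrt (4n) + 1) / 2
-- (√n is never exactly a half-integer; Python's float round agrees on the tested range).
def isPrime (n : Int) : Bool :=
  if n < 2 then false
  else if n = 2 then true
  else if PySem.Int.mod n 2 = 0 then false
  else
    let maxFactor : Int := ((Nat.sqrt (4 * n.toNat) + 1) / 2 : Nat)
    (PySem.List.pyRange 3 (maxFactor + 1) 2).all (fun f => !(PySem.Int.mod n f = 0))

-- A's recursion, fuel-guarded
def findRTPA (fuel : Nat) (digits : Int) (guess : Int) : Option Int :=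
  match fuel with
  | 0 => none
  | f + 1 =>
    if isPrime guess ∧ PySem.Str.len (PySem.Int.toStr guess) = digits then some guess
    else
      (PySem.List.pyRange 0 10 1).findSome? (fun newNum =>
        if isPrime (guess * 10 + newNum) then findRTPA f digits (guess * 10 + newNum)
        else none)

def findRTP (digits : Int) (guess : Int) : Option Int := findRTPA 64 digits guess

-- ===== PORT B =====
-- frontier = [x*10+d for x in frontier for d in range(10) if isPrime(x*10+d)]
def extendB (L : List Int) : List Int :=
  L.flatMap (fun x =>
    (PySem.List.pyRange 0 10 1).filterMap (fun d =>
      if isPrime (x * 10 + d) then some (x * 10 + d) else none))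

-- B's while loop, with the same fuel guard (one unit per level)
def bfsB (fuel : Nat) (digits : Int) (frontier : List Int) : Option Int :=
  match fuel with
  | 0 => none
  | f + 1 =>
    match frontier with
    | [] => none
    | x :: t =>
      if PySem.Str.len (PySem.Int.toStr x) = digits then
        match (x :: t).filter (fun y => isPrime y) with
        | [] => bfsB f digits (extendB (x :: t))
        | c :: cs => PySem.List.min? (c :: cs) (fun y => y)
      else bfsB f digits (extendB (x :: t))

def findRTP_alt (digits : Int) (guess : Int) : Option Int := bfsB 64 digits [guess]

-- ===== PRECONDITION & SPEC =====
def Spec_findRTP (digits : Int) (guess : Int) (out : Option Int) : Prop := out = findRTP_alt digits guess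
instance (digits : Int) (guess : Int) (out : Option Int) : Decidable (Spec_findRTP digits guess out) := by unfold Spec_findRTP; infer_instance

-- ===== CLAIM (what is proved, stated in full; the proofs are below) =====
def Claim_equal_findRTP : Prop := ∀ (digits : Int) (guess : Int), Dom_findRTP digits guess → Spec_findRTP digits guess (findRTP digits guess)

-- ===== LEMMAS AND PROOFS =====

-- len(str(x)), as both ports compute it
def pyLen (x : Int) : Int := PySem.Str.len (PySem.Int.toStr x)

-- invariant of the BFS frontier: a singleton, or an all-prime strictly sorted
-- uniform-string-length level
def InvFr (L : List Int) : Prop :=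
  (∃ g, L = [g]) ∨
  (L.Pairwise (· < ·) ∧ (∀ x ∈ L, isPrime x = true) ∧
   ∀ x ∈ L, ∀ y ∈ L, pyLen x = pyLen y)

theorem isPrime_two_le {x : Int} (h : isPrime x = true) : 2 ≤ x := by
  by_contra hlt
  rw [not_le] at hlt
  unfold isPrime at h
  rw [if_pos (by omega : x < 2)] at h
  exact Bool.false_ne_true h

theorem pyLen_ten {x d : Int} (hx : 1 ≤ x) (hd0 : 0 ≤ d) (hd : d < 10) :
    pyLen (x * 10 + d) = pyLen x + 1 := by
  have hds : (PySem.Int.toChars (x * 10 + d)).length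
      = (PySem.Int.toChars x).length + 1 := by
    have hpos : ¬ (x * 10 + d < 0) := by omega
    have hxpos : ¬ (x < 0) := by omega
    have hnat : (x * 10 + d).toNat = 10 * x.toNat + d.toNat := by omega
    have happ := Nat.toDigits_append_toDigits (b := 10) (n := x.toNat) (d := d.toNat)
      (by norm_num) (by omega) (by omega)
    have hlt : d.toNat < 10 := by omega
    rw [PySem.Int.toChars, PySem.Int.toChars, if_neg hpos, if_neg hxpos, hnat, ← happ,
      List.length_append, Nat.toDigits_of_lt_base hlt, List.length_cons, List.length_nil]
  simp only [pyLen, PySem.Str.len, PySem.Int.toList_toStr, hds]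
  push_cast
  ring

theorem pyLen_digit {d : Int} (h2 : 2 ≤ d) (h9 : d < 10) : pyLen d = 1 := by
  interval_cases d <;> decide

-- the str-length of a prime child, by the parent's sign
theorem pyLen_child {u du : Int} (h0 : 0 ≤ du) (h9 : du < 10) (h2 : 2 ≤ u * 10 + du) :
    pyLen (u * 10 + du) = if 1 ≤ u then pyLen u + 1 else 1 := by
  by_cases hu : 1 ≤ u
  · rw [if_pos hu, pyLen_ten hu h0 h9]
  · rw [if_neg hu]
    have hu0 : u = 0 := by omega
    subst hu0
    have he : (0 : Int) * 10 + du = du := by ring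
    rw [he]
    exact pyLen_digit (by omega) (by omega)

theorem mem_extendB {L : List Int} {z : Int} (hz : z ∈ extendB L) :
    ∃ x ∈ L, ∃ d : Int, 0 ≤ d ∧ d < 10 ∧ isPrime z = true ∧ z = x * 10 + d := by
  simp only [extendB, List.mem_flatMap, List.mem_filterMap] at hz
  obtain ⟨x, hx, d, hd, hif⟩ := hz
  rw [PySem.List.mem_pyRange_one] at hd
  by_cases hp : isPrime (x * 10 + d) = true
  · simp only [hp, if_pos, Option.some.injEq] at hif
    exact ⟨x, hx, d, hd.1, hd.2, hif ▸ hp, hif.symm⟩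
  · simp [hp] at hif

theorem extendB_prime {L : List Int} : ∀ z ∈ extendB L, isPrime z = true := by
  intro z hz; obtain ⟨_, _, _, _, _, hp, _⟩ := mem_extendB hz; exact hp

theorem pairwise_extendOne (x : Int) :
    ((PySem.List.pyRange 0 10 1).filterMap (fun d =>
      if isPrime (x * 10 + d) then some (x * 10 + d) else none)).Pairwise (· < ·) := by
  rw [List.pairwise_filterMap]
  apply List.Pairwise.imp ?_ (PySem.List.pairwise_lt_pyRange_one 0 10)
  intro a b hab v hv w hw
  by_cases hp : isPrime (x * 10 + a) = true
  · by_cases hq : isPrime (x * 10 + b) = true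
    · simp only [hp, if_pos, Option.some.injEq] at hv
      simp only [hq, if_pos, Option.some.injEq] at hw
      omega
    · simp [hq] at hw
  · simp [hp] at hv

theorem pairwise_extendB {L : List Int} (h : L.Pairwise (· < ·)) :
    (extendB L).Pairwise (· < ·) := by
  induction L with
  | nil => simp [extendB]
  | cons x t ih =>
    rw [List.pairwise_cons] at h
    rw [extendB, List.flatMap_cons, List.pairwise_append]
    refine ⟨pairwise_extendOne x, ?_, ?_⟩
    · have := ih h.2; rw [extendB] at this; exact this
    · intro a ha b hb
      have ha' : ∃ d : Int, 0 ≤ d ∧ d < 10 ∧ a = x * 10 + d := by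
        rw [List.mem_filterMap] at ha
        obtain ⟨d, hd, hif⟩ := ha
        rw [PySem.List.mem_pyRange_one] at hd
        by_cases hp : isPrime (x * 10 + d) = true
        · simp only [hp, if_pos, Option.some.injEq] at hif
          exact ⟨d, hd.1, hd.2, hif.symm⟩
        · simp [hp] at hif
      have hb' : ∃ y ∈ t, ∃ e : Int, 0 ≤ e ∧ e < 10 ∧ b = y * 10 + e := by
        have hbt : b ∈ extendB t := by rw [extendB]; exact hb
        obtain ⟨y, hy, e, he1, he2, _, hbe⟩ := mem_extendB hbt
        exact ⟨y, hy, e, he1, he2, hbe⟩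
      obtain ⟨da, h0a, h9a, rfl⟩ := ha'
      obtain ⟨y, hy, e, h0e, h9e, rfl⟩ := hb'
      have := h.1 y hy
      omega

theorem uniformLen_extendB {L : List Int} (hInv : InvFr L) :
    ∀ a ∈ extendB L, ∀ b ∈ extendB L, pyLen a = pyLen b := by
  intro a ha b hb
  obtain ⟨x, hx, da, h0a, h9a, hpa, rfl⟩ := mem_extendB ha
  obtain ⟨y, hy, db, h0b, h9b, hpb, rfl⟩ := mem_extendB hb
  have h2a := isPrime_two_le hpa
  have h2b := isPrime_two_le hpb
  rw [pyLen_child h0a h9a h2a, pyLen_child h0b h9b h2b]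
  rcases hInv with ⟨g, hg⟩ | ⟨_, hall, hu⟩
  · subst hg
    have hxg : x = g := by simpa using hx
    have hyg : y = g := by simpa using hy
    rw [hxg, hyg]
  · have hx1 : 1 ≤ x := by have := isPrime_two_le (hall x hx); omega
    have hy1 : 1 ≤ y := by have := isPrime_two_le (hall y hy); omega
    rw [if_pos hx1, if_pos hy1, hu x hx y hy]

theorem inv_extendB {L : List Int} (hInv : InvFr L) : InvFr (extendB L) := by
  refine Or.inr ⟨?_, extendB_prime, uniformLen_extendB hInv⟩
  rcases hInv with ⟨g, hg⟩ | ⟨hs, _, _⟩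
  · subst hg; exact pairwise_extendB (by simp)
  · exact pairwise_extendB hs

-- first element of a strictly sorted list is min(xs)
theorem min?_sorted {x : Int} {t : List Int} (h : (x :: t).Pairwise (· < ·)) :
    PySem.List.min? (x :: t) (fun y => y) = some x := by
  rw [PySem.List.min?_id_cons]
  congr 1
  rw [List.pairwise_cons] at h
  have hle : ∀ y ∈ t, x ≤ y := fun y hy => le_of_lt (h.1 y hy)
  clear h
  induction t generalizing x with
  | nil => rfl
  | cons a l ih =>
    have hxa : x ≤ a := hle a (by simp)
    simp only [List.foldl_cons, min_eq_left hxa]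
    exact ih fun y hy => hle y (List.mem_cons_of_mem a hy)

-- findSome? over the guarded range = findSome? over the filterMapped children
theorem findSome?_guard (l : List Int) (x : Int) (h : Int → Option Int) :
    l.findSome? (fun d => if isPrime (x * 10 + d) then h (x * 10 + d) else none)
      = (l.filterMap (fun d => if isPrime (x * 10 + d) then some (x * 10 + d) else none)).findSome? h := by
  induction l with
  | nil => rfl
  | cons a l ih =>
    rw [List.findSome?_cons, List.filterMap_cons]
    by_cases hp : isPrime (x * 10 + a) = true
    · simp only [hp, if_pos, List.findSome?_cons]
      cases h (x * 10 + a) <;> simp [ih]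
    · simp only [eq_false_of_ne_true hp, Bool.false_eq_true, if_false, ih]

theorem findSome?_flatMap (L : List Int) (g : Int → List Int) (h : Int → Option Int) :
    (L.flatMap g).findSome? h = L.findSome? (fun y => (g y).findSome? h) := by
  induction L with
  | nil => rfl
  | cons a l ih =>
    rw [List.flatMap_cons, List.findSome?_append, List.findSome?_cons]
    cases hfa : (g a).findSome? h <;> simp [ih]

theorem findSome?_congr' {L : List Int} {f g : Int → Option Int}
    (h : ∀ y ∈ L, f y = g y) : L.findSome? f = L.findSome? g := by
  induction L with
  | nil => rfl
  | cons a l ih =>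
    rw [List.findSome?_cons, List.findSome?_cons, h a (by simp)]
    cases g a with
    | none => exact ih fun y hy => h y (List.mem_cons_of_mem a hy)
    | some v => rfl

theorem findSome?_none (L : List Int) :
    L.findSome? (fun _ : Int => (none : Option Int)) = none := by
  induction L with
  | nil => rfl
  | cons a l ih => rw [List.findSome?_cons]; exact ih

-- one DFS step on a frontier with no base-case hit = DFS on the extended frontier
theorem dfs_step (f : Nat) (digits : Int) (L : List Int)
    (h : ∀ y ∈ L, ¬(isPrime y = true ∧ pyLen y = digits)) :
    L.findSome? (findRTPA (f + 1) digits) = (extendB L).findSome? (findRTPA f digits) := by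
  rw [extendB, findSome?_flatMap]
  apply findSome?_congr'
  intro y hy
  have hunf : findRTPA (f + 1) digits y
      = if isPrime y ∧ PySem.Str.len (PySem.Int.toStr y) = digits then some y
        else (PySem.List.pyRange 0 10 1).findSome? (fun d =>
          if isPrime (y * 10 + d) then findRTPA f digits (y * 10 + d) else none) := rfl
  rw [hunf, if_neg (fun hc => h y hy ⟨hc.1, hc.2⟩)]
  exact findSome?_guard _ y _

-- the main induction: on frontiers satisfying the invariant, DFS = BFS (same fuel)
theorem dfs_eq_bfs (f : Nat) (digits : Int) :
    ∀ L : List Int, InvFr L → L.findSome? (findRTPA f digits) = bfsB f digits L := by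
  induction f with
  | zero =>
    intro L _
    have hz : ∀ y ∈ L, findRTPA 0 digits y = (fun _ : Int => (none : Option Int)) y :=
      fun y _ => rfl
    rw [findSome?_congr' hz, findSome?_none]
    rfl
  | succ f ih =>
    intro L hInv
    match L with
    | [] => rfl
    | x :: t =>
      have hcases : t = [] ∨
          ((x :: t).Pairwise (· < ·) ∧ (∀ y ∈ x :: t, isPrime y = true) ∧
           ∀ a ∈ x :: t, ∀ b ∈ x :: t, pyLen a = pyLen b) := by
        rcases hInv with ⟨g, hg⟩ | h
        · left; simp only [List.cons.injEq] at hg; exact hg.2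
        · right; exact h
      rw [bfsB]
      by_cases hlen : pyLen x = digits
      · rw [if_pos (show PySem.Str.len (PySem.Int.toStr x) = digits from hlen)]
        cases hfilt : (x :: t).filter (fun y => isPrime y) with
        | nil =>
          have hnp := List.filter_eq_nil_iff.mp hfilt
          rw [dfs_step f digits _ (fun y hy hc => hnp y hy hc.1)]
          exact ih _ (inv_extendB hInv)
        | cons c cs =>
          have hx : isPrime x = true := by
            rcases hcases with rfl | ⟨_, hall, _⟩
            · by_cases hp : isPrime x = true
              · exact hp
              · rw [List.filter_cons] at hfilt
                simp [hp] at hfilt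
            · exact hall x (by simp)
          have hsorted : (x :: t).Pairwise (· < ·) := by
            rcases hcases with rfl | ⟨hs, _, _⟩
            · simp
            · exact hs
          have hfeq : (x :: t).filter (fun y => isPrime y) = x :: t := by
            rcases hcases with rfl | ⟨_, hall, _⟩
            · rw [List.filter_cons]
              simp [hx]
            · exact List.filter_eq_self.mpr (by intro y hy; simpa using hall y hy)
          have hbase : findRTPA (f + 1) digits x = some x := by
            have hunf : findRTPA (f + 1) digits x
                = if isPrime x ∧ PySem.Str.len (PySem.Int.toStr x) = digits then some x
                  else (PySem.List.pyRange 0 10 1).findSome? (fun d =>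
                    if isPrime (x * 10 + d) then findRTPA f digits (x * 10 + d) else none) := rfl
            rw [hunf, if_pos ⟨hx, hlen⟩]
          rw [List.findSome?_cons, hbase]
          rw [← hfilt, hfeq]
          show some x = PySem.List.min? (x :: t) (fun y => y)
          rw [min?_sorted hsorted]
      · rw [if_neg (show ¬ PySem.Str.len (PySem.Int.toStr x) = digits from hlen)]
        have hnl : ∀ y ∈ x :: t, pyLen y ≠ digits := by
          intro y hy
          rcases hcases with rfl | ⟨_, _, hu⟩
          · have hyx : y = x := by simpa using hy
            rw [hyx]; exact hlen
          · rw [hu y hy x (by simp)]; exact hlen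
        rw [dfs_step f digits _ (fun y hy hc => hnl y hy hc.2)]
        exact ih _ (inv_extendB hInv)

-- ===== VERDICT (by name: the statement is the Claim_ definition above) =====
theorem findRTP_spec : Claim_equal_findRTP := by
  intro digits guess _
  unfold Spec_findRTP findRTP findRTP_alt
  have h := dfs_eq_bfs 64 digits [guess] (Or.inl ⟨guess, rfl⟩)
  calc findRTPA 64 digits guess
      = [guess].findSome? (findRTPA 64 digits) := by
        cases hv : findRTPA 64 digits guess <;> simp [hv]
    _ = bfsB 64 digits [guess] := h
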